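-- pv_equiv track=rewrite | github.com/daniel-reich/ubiquitous-fiesta | wbhjXmdbPSxCSE5hW_8.py | sigilize
-- ===== SOURCE A (Python) =====
-- def sigilize(desire):
--   desire = desire.lower()
--   s= ""
--   for ch in desire:
--     if ch not in ["a","e","i","o","u"]:
--       s+= ch
--   no_reps = ""
--   for ch in s[::-1]:
--     if ch not in no_reps:
--       no_reps += ch
--   no_reps = no_reps[::-1]
--   return no_reps.upper().replace(" ","")
-- ===== SOURCE B (Python) =====
-- def sigilize(desire):
--     s = [ch for ch in desire.lower() if ch not in "aeiou"]
--     last = {ch: i for i, ch in enumerate(s)}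
--     kept = [ch for i, ch in enumerate(s) if last[ch] == i]
--     return "".join(kept).upper().replace(" ", "")
-- ===== Notes on version B (the rewrite author's own statement) =====
-- stated objective: alternative
-- what changed: Replaces A's reverse-then-dedup-by-accumulator-membership-scan-then-reverse with a last-occurrence index table built once over the consonant string and a single forward filtering pass.
import Mathlib
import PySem

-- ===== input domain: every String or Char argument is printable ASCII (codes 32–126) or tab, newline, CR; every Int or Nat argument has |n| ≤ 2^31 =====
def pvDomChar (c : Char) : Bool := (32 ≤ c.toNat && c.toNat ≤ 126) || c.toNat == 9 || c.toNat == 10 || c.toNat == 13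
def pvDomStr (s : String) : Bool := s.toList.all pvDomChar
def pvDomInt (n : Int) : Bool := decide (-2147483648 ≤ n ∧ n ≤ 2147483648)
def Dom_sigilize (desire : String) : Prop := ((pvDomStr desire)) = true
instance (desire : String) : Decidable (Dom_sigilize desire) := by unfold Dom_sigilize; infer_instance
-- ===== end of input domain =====

-- B replaces A's reverse-pass dedup (membership scan into the accumulator, then a second
-- reversal) by a last-occurrence index table built once plus one forward filtering pass.

-- ===== PORT A =====
-- s[::-1] is list reversal (PySem.List.slice?_none_none_neg_one); ported as .reverse.
def sigilize (desire : String) : String :=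
  let d := PySem.Chars.lower desire.toList
  let s := d.foldl (fun acc ch => if ch ∉ ['a', 'e', 'i', 'o', 'u'] then acc ++ [ch] else acc) []
  let noReps := s.reverse.foldl (fun acc ch => if ch ∉ acc then acc ++ [ch] else acc) []
  let noReps := noReps.reverse
  String.ofList (PySem.Chars.replace (PySem.Chars.upper noReps) [' '] [])

-- ===== PORT B =====
def sigilize_alt (desire : String) : String :=
  let s := (PySem.Chars.lower desire.toList).filter
             (fun ch => decide (ch ∉ ['a', 'e', 'i', 'o', 'u']))
  let last := (PySem.List.enumerate s 0).foldl
                (fun d p => d.insert p.2 p.1) (PySem.Dict.empty : PySem.Dict Char Int)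
  let kept := ((PySem.List.enumerate s 0).filter
                (fun p => last.get? p.2 == some p.1)).map (·.2)
  String.ofList (PySem.Chars.replace (PySem.Chars.upper kept) [' '] [])

-- ===== PRECONDITION & SPEC =====
def Spec_sigilize (desire : String) (out : String) : Prop := out = sigilize_alt desire
instance (desire : String) (out : String) : Decidable (Spec_sigilize desire out) := by unfold Spec_sigilize; infer_instance

-- ===== CLAIM (what is proved, stated in full; the proofs are below) =====
def Claim_equal_sigilize : Prop := ∀ (desire : String), Dom_sigilize desire → Spec_sigilize desire (sigilize desire)

-- ===== LEMMAS AND PROOFS =====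

/-- Keep the last occurrence of each element, preserving order of those kept. -/
def pvKeepLast : List Char → List Char
  | [] => []
  | x :: xs => if x ∈ xs then pvKeepLast xs else x :: pvKeepLast xs

/-- A's dedup step. -/
def pvStep (acc : List Char) (ch : Char) : List Char :=
  if ch ∉ acc then acc ++ [ch] else acc

lemma pvStep_mem {acc : List Char} {c : Char} (h : c ∈ acc) : pvStep acc c = acc := by
  simp [pvStep, h]

lemma pvStep_not_mem {acc : List Char} {c : Char} (h : c ∉ acc) :
    pvStep acc c = acc ++ [c] := by
  simp [pvStep, h]

lemma pv_mem_foldl_step (l : List Char) (acc : List Char) (c : Char) :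
    c ∈ l.foldl pvStep acc ↔ c ∈ acc ∨ c ∈ l := by
  induction l generalizing acc with
  | nil => simp
  | cons x xs ih =>
    simp only [List.foldl_cons, ih, pvStep]
    by_cases hx : x ∈ acc <;> by_cases hcx : c = x <;> simp [hx, hcx]

lemma pv_Acore_eq_keepLast (s : List Char) :
    (s.reverse.foldl pvStep []).reverse = pvKeepLast s := by
  induction s with
  | nil => simp [pvKeepLast]
  | cons x xs ih =>
    have hx : x ∈ xs.reverse.foldl pvStep ([] : List Char) ↔ x ∈ xs := by
      simpa using pv_mem_foldl_step xs.reverse [] x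
    rw [List.reverse_cons, List.foldl_append, List.foldl_cons, List.foldl_nil]
    by_cases h : x ∈ xs
    · rw [pvStep_mem (hx.mpr h), ih]
      simp only [pvKeepLast]
      rw [if_pos h]
    · rw [pvStep_not_mem (fun hc => h (hx.mp hc)), List.reverse_append, ih]
      simp only [pvKeepLast]
      rw [if_neg h]
      simp

lemma pv_keepLast_append (t : List Char) (x : Char) :
    pvKeepLast (t ++ [x]) = (pvKeepLast t).filter (fun c => c != x) ++ [x] := by
  induction t with
  | nil => simp [pvKeepLast]
  | cons c t' ih =>
    simp only [List.cons_append, pvKeepLast, List.mem_append, List.mem_singleton, ih]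
    by_cases hct : c ∈ t'
    · simp [hct]
    · by_cases hcx : c = x
      · subst hcx
        simp [hct]
      · simp [hct, hcx, bne_iff_ne]

/-- The dict B builds over the enumeration of `s`. -/
def pvLastDict (s : List Char) : PySem.Dict Char Int :=
  (PySem.List.enumerate s 0).foldl (fun d p => d.insert p.2 p.1) PySem.Dict.empty

/-- B's core pass: keep the pairs whose index is the recorded last index. -/
def pvBcore (s : List Char) : List Char :=
  ((PySem.List.enumerate s 0).filter (fun p => (pvLastDict s).get? p.2 == some p.1)).map (·.2)

lemma pv_lastDict_append (t : List Char) (x : Char) :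
    pvLastDict (t ++ [x]) = (pvLastDict t).insert x (t.length : Int) := by
  simp [pvLastDict, PySem.List.enumerate_append, PySem.List.enumerate_cons,
    PySem.List.enumerate_nil, List.foldl_append]

lemma pv_fst_lt_of_mem_enumerate (t : List Char) (p : Int × Char)
    (hp : p ∈ PySem.List.enumerate t 0) : p.1 < (t.length : Int) := by
  rcases (PySem.List.mem_enumerate_iff _ _ _).mp hp with ⟨k, hk, rfl⟩
  simpa using (by exact_mod_cast hk : (k : Int) < (t.length : Int))

lemma pv_Bcore_eq_keepLast (s : List Char) : pvBcore s = pvKeepLast s := by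
  induction s using List.reverseRecOn with
  | nil => simp [pvBcore, pvKeepLast, PySem.List.enumerate_nil]
  | append_singleton t x ih =>
    rw [pv_keepLast_append, ← ih]
    simp only [pvBcore, pv_lastDict_append, PySem.List.enumerate_append,
      PySem.List.enumerate_cons, PySem.List.enumerate_nil, List.filter_append, List.map_append]
    have hlast : ((pvLastDict t).insert x (t.length : Int)).get? x = some (t.length : Int) :=
      PySem.Dict.get?_insert_self _ _ _
    have hcong :
        (PySem.List.enumerate t 0).filter
            (fun p => ((pvLastDict t).insert x (t.length : Int)).get? p.2 == some p.1)
          = (PySem.List.enumerate t 0).filter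
            (fun p => (p.2 != x) && ((pvLastDict t).get? p.2 == some p.1)) := by
      apply List.filter_congr
      intro p hp
      by_cases hpx : p.2 = x
      · have hlt := pv_fst_lt_of_mem_enumerate t p hp
        have hne : (t.length : Int) ≠ p.1 := by omega
        simp [hpx, hlast, hne]
      · simp [PySem.Dict.get?_insert_of_ne _ _ hpx, hpx]
    rw [hcong]
    have hsplit :
        (PySem.List.enumerate t 0).filter
            (fun p => (p.2 != x) && ((pvLastDict t).get? p.2 == some p.1))
          = ((PySem.List.enumerate t 0).filter
              (fun p => (pvLastDict t).get? p.2 == some p.1)).filter (fun p => p.2 != x) := by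
      rw [List.filter_filter]
    have hmapfilter' :
        ∀ (l : List (Int × Char)),
          (l.filter (fun p => p.2 != x)).map (·.2) = (l.map (·.2)).filter (fun c => c != x) := by
      intro l
      induction l with
      | nil => rfl
      | cons q l' ihl =>
        by_cases hq : q.2 = x
        · simp [hq, ihl]
        · simp [hq, ihl]
    rw [hsplit, hmapfilter']
    simp [hlast]

-- ===== VERDICT (by name: the statement is the Claim_ definition above) =====
theorem sigilize_spec : Claim_equal_sigilize := by
  intro desire _
  unfold Spec_sigilize sigilize sigilize_alt
  simp only []
  have hs :
      (PySem.Chars.lower desire.toList).foldl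
          (fun acc ch => if ch ∉ ['a', 'e', 'i', 'o', 'u'] then acc ++ [ch] else acc) []
        = (PySem.Chars.lower desire.toList).filter
            (fun ch => decide (ch ∉ ['a', 'e', 'i', 'o', 'u'])) := by
    simpa using PySem.List.foldl_append_ite_eq_filter
      (fun ch => ch ∉ ['a', 'e', 'i', 'o', 'u']) (PySem.Chars.lower desire.toList) []
  rw [hs]
  set s := (PySem.Chars.lower desire.toList).filter
            (fun ch => decide (ch ∉ ['a', 'e', 'i', 'o', 'u'])) with hsdef
  have hA : (s.reverse.foldl (fun acc ch => if ch ∉ acc then acc ++ [ch] else acc) []).reverse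
      = pvKeepLast s := pv_Acore_eq_keepLast s
  have hB :
      ((PySem.List.enumerate s 0).filter
          (fun p =>
            ((PySem.List.enumerate s 0).foldl (fun d p => d.insert p.2 p.1)
                (PySem.Dict.empty : PySem.Dict Char Int)).get? p.2 == some p.1)).map (·.2)
        = pvKeepLast s := pv_Bcore_eq_keepLast s
  rw [hA, hB]
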